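-- pv_equiv track=rewrite | github.com/redgy/adventofcode | 2024/days/day02.py | get_list_ranking
-- ===== SOURCE A (Python) =====
-- def get_is_increasing_list(array: list[int]) -> list[bool]:
--     array_pairs = zip(array, array[1:])  # pair first item with next item in list
--     return [num_one < num_two for num_one, num_two in array_pairs]
--
-- def get_is_decreasing_list(array: list[int]) -> list[bool]:
--     array_pairs = zip(array, array[1:])  # pair first item with next item in list
--     return [num_one > num_two for num_one, num_two in array_pairs]
--
-- def get_list_ranking(array: list[int]) -> int:
--     """Is the list increasing, decreasing, or neither?
--
--     If decreasing: return -1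
--     If increasing: return 1
--     If neither: return 0
--     """
--     is_increasing_list = get_is_increasing_list(array)
--     is_decreasing_list = get_is_decreasing_list(array)
--     num_increasing = sum([1 for x in is_increasing_list if x])
--     num_decreasing = sum([1 for x in is_decreasing_list if x])
--     if num_decreasing > num_increasing:
--         return -1
--     if num_increasing > num_decreasing:
--         return 1
--     return 0
-- ===== SOURCE B (Python) =====
-- def get_list_ranking(array: list[int]) -> int:
--     score = 0
--     for a, b in zip(array, array[1:]):
--         if a < b:
--             score += 1
--         elif a > b:
--             score -= 1
--     if score > 0:
--         return 1
--     if score < 0: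
--         return -1
--     return 0
-- ===== Notes on version B (the rewrite author's own statement) =====
-- stated objective: faster
-- what changed: Replaces the two boolean comparison lists and two separate counts with a single pass maintaining one net score (+1 per increasing pair, -1 per decreasing pair), returning its sign; avoids building intermediate lists.
import Mathlib
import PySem

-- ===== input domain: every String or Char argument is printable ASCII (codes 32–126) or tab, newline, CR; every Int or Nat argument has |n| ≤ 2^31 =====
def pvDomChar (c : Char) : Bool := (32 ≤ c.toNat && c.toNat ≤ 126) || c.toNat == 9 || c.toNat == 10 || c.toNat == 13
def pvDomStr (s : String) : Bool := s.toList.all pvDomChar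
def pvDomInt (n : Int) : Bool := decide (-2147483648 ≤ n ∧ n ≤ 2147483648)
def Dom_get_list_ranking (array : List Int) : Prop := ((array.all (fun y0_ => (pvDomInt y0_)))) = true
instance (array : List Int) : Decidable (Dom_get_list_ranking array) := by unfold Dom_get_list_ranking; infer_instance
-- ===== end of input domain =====

-- B replaces A's two boolean lists and two counts with one single-pass net score; objective: simpler.

-- ===== PORT A =====
def get_is_increasing_list (array : List Int) : List Bool :=
  (array.zip (PySem.List.slice array (some 1) none)).map (fun p => decide (p.1 < p.2))

def get_is_decreasing_list (array : List Int) : List Bool :=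
  (array.zip (PySem.List.slice array (some 1) none)).map (fun p => decide (p.1 > p.2))

def get_list_ranking (array : List Int) : Int :=
  let is_increasing_list := get_is_increasing_list array
  let is_decreasing_list := get_is_decreasing_list array
  let num_increasing : Int := ((is_increasing_list.filter (fun x => x)).map (fun _ => (1 : Int))).sum
  let num_decreasing : Int := ((is_decreasing_list.filter (fun x => x)).map (fun _ => (1 : Int))).sum
  if num_decreasing > num_increasing then -1
  else if num_increasing > num_decreasing then 1
  else 0

-- ===== PORT B =====
def get_list_ranking_alt (array : List Int) : Int :=
  let score := (array.zip (PySem.List.slice array (some 1) none)).foldl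
    (fun s p => if p.1 < p.2 then s + 1 else if p.1 > p.2 then s - 1 else s) (0 : Int)
  if score > 0 then 1 else if score < 0 then -1 else 0

-- ===== PRECONDITION & SPEC =====
def Spec_get_list_ranking (array : List Int) (out : Int) : Prop := out = get_list_ranking_alt array
instance (array : List Int) (out : Int) : Decidable (Spec_get_list_ranking array out) := by unfold Spec_get_list_ranking; infer_instance

-- ===== CLAIM (what is proved, stated in full; the proofs are below) =====
def Claim_equal_get_list_ranking : Prop := ∀ (array : List Int), Dom_get_list_ranking array → Spec_get_list_ranking array (get_list_ranking array)

-- ===== LEMMAS AND PROOFS =====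

def pvInc (ps : List (Int × Int)) : Int :=
  (((ps.map (fun p => decide (p.1 < p.2))).filter (fun x => x)).map (fun _ => (1 : Int))).sum

def pvDec (ps : List (Int × Int)) : Int :=
  (((ps.map (fun p => decide (p.1 > p.2))).filter (fun x => x)).map (fun _ => (1 : Int))).sum

theorem pv_score_eq (ps : List (Int × Int)) (s : Int) :
    ps.foldl (fun s p => if p.1 < p.2 then s + 1 else if p.1 > p.2 then s - 1 else s) s
      = s + pvInc ps - pvDec ps := by
  induction ps generalizing s with
  | nil => simp [pvInc, pvDec]
  | cons p ps ih =>
    simp only [List.foldl_cons, ih]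
    rcases lt_trichotomy p.1 p.2 with h | h | h
    · simp [pvInc, pvDec, h, not_lt_of_gt h]; omega
    · simp [pvInc, pvDec, h]
    · simp [pvInc, pvDec, h, not_lt_of_gt h]; omega

theorem get_list_ranking_eq (array : List Int) :
    get_list_ranking array = get_list_ranking_alt array := by
  simp only [get_list_ranking, get_list_ranking_alt, get_is_increasing_list,
    get_is_decreasing_list, pv_score_eq, pvInc, pvDec]
  split_ifs <;> omega

-- ===== VERDICT (by name: the statement is the Claim_ definition above) =====
theorem get_list_ranking_spec : Claim_equal_get_list_ranking := by
  intro array _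
  exact get_list_ranking_eq array
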